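-- pv_equiv track=rewrite | github.com/mmenalla/readlike-me | utils/gutenberg_utils.py | get_plaintext_url
-- ===== SOURCE A (Python) =====
-- def get_plaintext_url(formats: dict) -> str:
--     for mime, url in formats.items():
--         if 'text/plain' in mime or 'text' in mime:
--             return url
--     for mime, url in formats.items():
--         if 'htm' in mime or 'html' in url:
--             return url
--     for mime, url in formats.items():
--         if 'pdf' in mime:
--             return url
--     raise ValueError("No suitable format found in formats.")
-- ===== SOURCE B (Python) =====
-- def get_plaintext_url(formats: dict) -> str:
--     html = None
--     pdf = None
--     for mime, url in formats.items():
--         if 'text' in mime: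
--             return url
--         if html is None and ('htm' in mime or 'html' in url):
--             html = url
--         elif pdf is None and 'pdf' in mime:
--             pdf = url
--     if html is not None:
--         return html
--     if pdf is not None:
--         return pdf
--     raise ValueError("No suitable format found in formats.")
-- ===== Notes on version B (the rewrite author's own statement) =====
-- stated objective: simpler
-- what changed: Replaced A's three full scans of formats (text, then html, then pdf) by one single pass that returns immediately on a text match and records first-seen html/pdf candidates, resolved by priority after the loop; the redundant 'text/plain' check is dropped since 'text' subsumes it.
import Mathlib
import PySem

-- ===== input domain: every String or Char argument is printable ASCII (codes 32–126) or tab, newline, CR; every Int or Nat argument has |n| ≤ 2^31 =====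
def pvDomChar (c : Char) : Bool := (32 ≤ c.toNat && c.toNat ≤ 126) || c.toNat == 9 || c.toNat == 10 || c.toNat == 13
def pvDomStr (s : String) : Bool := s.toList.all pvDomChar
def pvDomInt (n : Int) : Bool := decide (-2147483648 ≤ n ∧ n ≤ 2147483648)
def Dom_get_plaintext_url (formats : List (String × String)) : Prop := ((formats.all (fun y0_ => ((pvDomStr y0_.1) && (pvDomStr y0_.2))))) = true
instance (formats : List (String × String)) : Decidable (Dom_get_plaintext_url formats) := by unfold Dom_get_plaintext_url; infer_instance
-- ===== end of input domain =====

-- B replaces A's three full scans of formats by one single pass with first-seen html/pdf candidates (simpler; return value only — equal wherever A returns, Pre_ excludes the ValueError case).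


-- ===== PORT A =====
-- A's first loop: return first url whose mime contains 'text/plain' or 'text'
def pvPassText : List (String × String) → Option String
  | [] => none
  | (mime, url) :: rest =>
    if PySem.Str.isIn "text/plain" mime || PySem.Str.isIn "text" mime then some url
    else pvPassText rest

-- A's second loop: first url with 'htm' in mime or 'html' in url
def pvPassHtml : List (String × String) → Option String
  | [] => none
  | (mime, url) :: rest =>
    if PySem.Str.isIn "htm" mime || PySem.Str.isIn "html" url then some url
    else pvPassHtml rest

-- A's third loop: first url with 'pdf' in mime
def pvPassPdf : List (String × String) → Option String
  | [] => none
  | (mime, url) :: rest =>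
    if PySem.Str.isIn "pdf" mime then some url
    else pvPassPdf rest

-- the final 'raise ValueError' is excluded by Pre_; "" stands for the non-returning branch
def get_plaintext_url (formats : List (String × String)) : String :=
  match pvPassText formats with
  | some u => u
  | none =>
    match pvPassHtml formats with
    | some u => u
    | none =>
      match pvPassPdf formats with
      | some u => u
      | none => ""

-- ===== PORT B =====
-- single pass carrying the first-seen html and pdf candidates; text short-circuits
def pvScanB : List (String × String) → Option String → Option String → String
  | [], html, pdf =>
    match html with
    | some h => h
    | none =>
      match pdf with
      | some p => p
      | none => ""          -- B's 'raise ValueError', excluded by Pre_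
  | (mime, url) :: rest, html, pdf =>
    if PySem.Str.isIn "text" mime then url
    else if html.isNone && (PySem.Str.isIn "htm" mime || PySem.Str.isIn "html" url) then
      pvScanB rest (some url) pdf
    else if pdf.isNone && PySem.Str.isIn "pdf" mime then
      pvScanB rest html (some url)
    else
      pvScanB rest html pdf

def get_plaintext_url_alt (formats : List (String × String)) : String :=
  pvScanB formats none none

-- ===== PRECONDITION & SPEC =====
-- Pre_ excludes exactly the inputs where Python A raises ValueError (no pair matches any of the three predicates); B raises there too.
def Pre_get_plaintext_url (formats : List (String × String)) : Prop :=
  formats.any (fun p =>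
    PySem.Str.isIn "text" p.1 || PySem.Str.isIn "htm" p.1 ||
    PySem.Str.isIn "html" p.2 || PySem.Str.isIn "pdf" p.1) = true
instance (formats : List (String × String)) : Decidable (Pre_get_plaintext_url formats) := by unfold Pre_get_plaintext_url; infer_instance

def pvWitness_get_plaintext_url : (List (String × String)) :=
  [("application/pdf", "u1"), ("text/html", "u2")]

def Spec_get_plaintext_url (formats : List (String × String)) (out : String) : Prop := out = get_plaintext_url_alt formats
instance (formats : List (String × String)) (out : String) : Decidable (Spec_get_plaintext_url formats out) := by unfold Spec_get_plaintext_url; infer_instance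

-- ===== CLAIM (what is proved, stated in full; the proofs are below) =====
def Claim_equal_get_plaintext_url : Prop := ∀ (formats : List (String × String)), Dom_get_plaintext_url formats → Pre_get_plaintext_url formats → Spec_get_plaintext_url formats (get_plaintext_url formats)

-- ===== LEMMAS AND PROOFS =====

-- A's redundant first-loop test collapses to B's: 'text/plain' in mime implies 'text' in mime
theorem pvTextTest (m : String) :
    (PySem.Str.isIn "text/plain" m || PySem.Str.isIn "text" m) = PySem.Str.isIn "text" m := by
  cases h : PySem.Str.isIn "text/plain" m with
  | false => simp
  | true =>
    have h1 : ("text/plain".toList) <:+: m.toList := (PySem.Str.isIn_iff_infix _ _).mp h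
    have h2 : ("text".toList) <:+: m.toList :=
      List.IsInfix.trans (by decide : ("text".toList) <:+: ("text/plain".toList)) h1
    simp only [Bool.true_or]
    exact ((PySem.Str.isIn_iff_infix _ _).mpr h2).symm

-- invariant of B's single pass: it computes A's three-scan result relative to the carried candidates
theorem pvScanB_eq (formats : List (String × String)) :
    ∀ (html pdf : Option String),
    pvScanB formats html pdf =
      match pvPassText formats with
      | some u => u
      | none =>
        match html with
        | some h => h
        | none =>
          match pvPassHtml formats with
          | some u => u
          | none =>
            match pdf with
            | some p => p
            | none =>
              match pvPassPdf formats with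
              | some u => u
              | none => "" := by
  induction formats with
  | nil => intro html pdf; cases html <;> cases pdf <;> rfl
  | cons hd tl ih =>
    intro html pdf
    obtain ⟨mime, url⟩ := hd
    simp only [pvScanB, pvPassText, pvPassHtml, pvPassPdf, pvTextTest]
    by_cases ht : PySem.Str.isIn "text" mime = true
    · rw [if_pos ht, if_pos ht]
    · rw [if_neg ht, if_neg ht]
      cases html with
      | none =>
        simp only [Option.isNone_none, Bool.true_and]
        by_cases hc2 : (PySem.Str.isIn "htm" mime || PySem.Str.isIn "html" url) = true
        · rw [if_pos hc2, if_pos hc2, ih (some url) pdf]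
        · rw [if_neg hc2, if_neg hc2]
          cases pdf with
          | none =>
            simp only [Option.isNone_none, Bool.true_and]
            by_cases hc3 : PySem.Str.isIn "pdf" mime = true
            · rw [if_pos hc3, if_pos hc3, ih none (some url)]
            · rw [if_neg hc3, if_neg hc3, ih none none]
          | some p0 =>
            simp only [Option.isNone_some, Bool.false_and, Bool.false_eq_true, if_false,
              ih none (some p0)]
      | some h0 =>
        simp only [Option.isNone_some, Bool.false_and, Bool.false_eq_true, if_false]
        cases pdf with
        | none =>
          simp only [Option.isNone_none, Bool.true_and]
          by_cases hc3 : PySem.Str.isIn "pdf" mime = true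
          · rw [if_pos hc3, ih (some h0) (some url)]
          · rw [if_neg hc3, ih (some h0) none]
        | some p0 =>
          simp only [Option.isNone_some, Bool.false_and, Bool.false_eq_true, if_false,
            ih (some h0) (some p0)]

-- ===== VERDICT (by name: the statement is the Claim_ definition above) =====
theorem get_plaintext_url_spec : Claim_equal_get_plaintext_url := by
  intro formats _ _
  unfold Spec_get_plaintext_url get_plaintext_url get_plaintext_url_alt
  rw [pvScanB_eq formats none none]
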